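-- pv_equiv track=rewrite | github.com/kamo104/PiTSZ | algorytmy/151841.py | calculate_delay
-- ===== SOURCE A (Python) =====
-- def calculate_delay(n, tasks, setup_times, J_order) -> int:
--     max_Y = float('inf')
--     current_time = 0
--     Y = 0
--
--     for i in range(n):
--         task_index = J_order[i]
--         p, d = tasks[task_index]
--
--         if i > 0:
--             prev_task_index = J_order[i - 1]
--             current_time += setup_times[prev_task_index][task_index]
--
--         current_time += p
--         if current_time > d:
--             Y += min(p, max(0, current_time - d))
--
--         if Y > max_Y:
--             return max_Y
--
--     return Y
-- ===== SOURCE B (Python) =====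
-- def calculate_delay(n, tasks, setup_times, J_order) -> int:
--     # Divide-and-conquer over the scheduled segment: a segment [lo, hi) started
--     # at time t yields (sum of capped tardiness, finishing time); two halves are
--     # combined with the single setup lookup that joins them.
--     def seg(lo, hi, t):
--         if hi - lo == 1:
--             j = J_order[lo]
--             p, d = tasks[j]
--             c = t + p
--             return ((min(p, c - d) if c > d else 0), c)
--         mid = (lo + hi) // 2
--         y1, e1 = seg(lo, mid, t)
--         y2, e2 = seg(mid, hi, e1 + setup_times[J_order[mid - 1]][J_order[mid]])
--         return (y1 + y2, e2)
--     if n <= 0: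
--         return 0
--     return seg(0, n, 0)[0]
-- ===== Notes on version B (the rewrite author's own statement) =====
-- stated objective: alternative
-- what changed: Replaces A's sequential indexed loop (with its dead max_Y early-exit and redundant max(0,..)) by a divide-and-conquer: a segment of the schedule returns the pair (capped-tardiness sum, finishing time) and two halves are merged with the one setup lookup joining them, correct because the delay summary of a segment depends on earlier jobs only through the start time.
import Mathlib
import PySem

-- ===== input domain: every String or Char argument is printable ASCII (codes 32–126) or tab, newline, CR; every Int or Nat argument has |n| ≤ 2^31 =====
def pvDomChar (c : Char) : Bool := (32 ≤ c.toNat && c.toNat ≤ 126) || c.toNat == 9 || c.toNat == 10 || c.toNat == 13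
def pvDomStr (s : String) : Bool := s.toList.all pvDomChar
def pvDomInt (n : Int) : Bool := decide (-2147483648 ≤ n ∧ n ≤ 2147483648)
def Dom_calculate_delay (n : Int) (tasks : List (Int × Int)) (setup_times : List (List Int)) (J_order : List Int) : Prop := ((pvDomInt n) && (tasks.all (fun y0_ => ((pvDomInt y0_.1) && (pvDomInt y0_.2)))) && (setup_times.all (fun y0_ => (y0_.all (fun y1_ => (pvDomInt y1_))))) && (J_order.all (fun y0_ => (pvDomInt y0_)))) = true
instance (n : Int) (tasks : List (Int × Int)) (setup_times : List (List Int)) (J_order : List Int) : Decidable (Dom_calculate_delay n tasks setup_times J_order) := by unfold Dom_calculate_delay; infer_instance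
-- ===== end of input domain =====

-- B replaces A's sequential loop (with its dead max_Y early-exit) by a divide-and-conquer over
-- schedule segments, each returning (capped-tardiness sum, finishing time); equal returns on Pre_.

-- ===== PORT A =====
-- setup_times[pv][j]
def pvRow (setup_times : List (List Int)) (pv j : Int) : Int :=
  PySem.List.pyGetD (PySem.List.pyGetD setup_times pv []) j 0

-- loop body of A (state = (current_time, Y)); the max_Y early-exit is dead code (Y > ∞ never holds)
def pvStepA (tasks : List (Int × Int)) (setup_times : List (List Int)) (J_order : List Int)
    (s : Int × Int) (i : Int) : Int × Int :=
  let task_index := PySem.List.pyGetD J_order i 0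
  let pd := PySem.List.pyGetD tasks task_index (0, 0)
  let ct0 := if i > 0 then s.1 + pvRow setup_times (PySem.List.pyGetD J_order (i - 1) 0) task_index else s.1
  let ct := ct0 + pd.1
  (ct, if ct > pd.2 then s.2 + min pd.1 (max 0 (ct - pd.2)) else s.2)

def calculate_delay (n : Int) (tasks : List (Int × Int)) (setup_times : List (List Int)) (J_order : List Int) : Int :=
  ((PySem.List.pyRange 0 n 1).foldl (pvStepA tasks setup_times J_order) (0, 0)).2

-- ===== PORT B =====
-- seg lo hi t: delay sum and finishing time of jobs J_order[lo:hi] started at time t.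
-- The Nat fuel only makes the recursion structural (each level halves the segment, so any
-- fuel ≥ hi - lo suffices); Python's base guard 'hi - lo == 1' becomes 'hi - lo ≤ 1', the
-- same computation on every reachable call (seg is only invoked with hi - lo ≥ 1).
def pvSeg (tasks : List (Int × Int)) (setup_times : List (List Int)) (J_order : List Int) :
    Nat → Int → Int → Int → Int × Int
  | 0, _, _, _ => (0, 0)
  | fuel + 1, lo, hi, t =>
    if hi - lo ≤ 1 then
      let j := PySem.List.pyGetD J_order lo 0
      let pd := PySem.List.pyGetD tasks j (0, 0)
      let c := t + pd.1
      ((if c > pd.2 then min pd.1 (c - pd.2) else 0), c)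
    else
      let mid := PySem.Int.floordiv (lo + hi) 2
      let r1 := pvSeg tasks setup_times J_order fuel lo mid t
      let r2 := pvSeg tasks setup_times J_order fuel mid hi
        (r1.2 + pvRow setup_times (PySem.List.pyGetD J_order (mid - 1) 0) (PySem.List.pyGetD J_order mid 0))
      (r1.1 + r2.1, r2.2)

def calculate_delay_alt (n : Int) (tasks : List (Int × Int)) (setup_times : List (List Int)) (J_order : List Int) : Int :=
  if n ≤ 0 then 0 else (pvSeg tasks setup_times J_order n.toNat 0 n 0).1

-- ===== PRECONDITION & SPEC =====
-- Pre_ excludes exactly the inputs on which Python A raises an IndexError: an index i < n beyond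
-- J_order, a scheduled job index outside tasks, or a consecutive pair whose setup_times lookup
-- (row by previous job, column by current job, Python negative indexing allowed) is out of range.
def Pre_calculate_delay (n : Int) (tasks : List (Int × Int)) (setup_times : List (List Int)) (J_order : List Int) : Prop :=
  n.toNat ≤ J_order.length ∧
  (∀ j ∈ J_order.take n.toNat, PySem.Raise.InRange tasks.length j) ∧
  (∀ pr ∈ (J_order.take n.toNat).zip (J_order.take n.toNat).tail,
      PySem.Raise.InRange setup_times.length pr.1 ∧
      PySem.Raise.InRange (PySem.List.pyGetD setup_times pr.1 []).length pr.2)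
instance (n : Int) (tasks : List (Int × Int)) (setup_times : List (List Int)) (J_order : List Int) : Decidable (Pre_calculate_delay n tasks setup_times J_order) := by unfold Pre_calculate_delay; infer_instance

def pvWitness_calculate_delay : Int × (List (Int × Int)) × List (List Int) × List Int :=
  (2, [(3, 2), (1, 5)], [[0, 1], [1, 0]], [0, 1])

def Spec_calculate_delay (n : Int) (tasks : List (Int × Int)) (setup_times : List (List Int)) (J_order : List Int) (out : Int) : Prop := out = calculate_delay_alt n tasks setup_times J_order
instance (n : Int) (tasks : List (Int × Int)) (setup_times : List (List Int)) (J_order : List Int) (out : Int) : Decidable (Spec_calculate_delay n tasks setup_times J_order out) := by unfold Spec_calculate_delay; infer_instance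

-- ===== CLAIM (what is proved, stated in full; the proofs are below) =====
def Claim_equal_calculate_delay : Prop := ∀ (n : Int) (tasks : List (Int × Int)) (setup_times : List (List Int)) (J_order : List Int), Dom_calculate_delay n tasks setup_times J_order → Pre_calculate_delay n tasks setup_times J_order → Spec_calculate_delay n tasks setup_times J_order (calculate_delay n tasks setup_times J_order)

-- ===== LEMMAS AND PROOFS =====

-- the setup time A adds on entering index lo (0 when lo = 0)
def pvStIn (setup_times : List (List Int)) (J_order : List Int) (lo : Int) : Int :=
  if lo > 0 then pvRow setup_times (PySem.List.pyGetD J_order (lo - 1) 0) (PySem.List.pyGetD J_order lo 0) else 0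

-- A's fold over [lo, hi) from state (s, Y) equals Y plus the segment summary started at s + stIn lo
lemma pvFold_eq_seg (tasks : List (Int × Int)) (setup_times : List (List Int)) (J_order : List Int) :
    ∀ (k : Nat) (lo hi s Y : Int), (hi - lo).toNat ≤ k → 1 ≤ hi - lo → 0 ≤ lo →
      (PySem.List.pyRange lo hi 1).foldl (pvStepA tasks setup_times J_order) (s, Y) =
        ((pvSeg tasks setup_times J_order k lo hi (s + pvStIn setup_times J_order lo)).2,
         Y + (pvSeg tasks setup_times J_order k lo hi (s + pvStIn setup_times J_order lo)).1) := by
  intro k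
  induction k with
  | zero => intro lo hi s Y hk h1 hlo; omega
  | succ k ih =>
    intro lo hi s Y hk h1 hlo
    by_cases hbase : hi - lo ≤ 1
    · -- hi = lo + 1
      have hhi : hi = lo + 1 := by omega
      subst hhi
      rw [PySem.List.pyRange_one_cons (by omega), PySem.List.pyRange_one_eq_nil (by omega), pvSeg]
      simp only [if_pos (show lo + 1 - lo ≤ 1 by omega), List.foldl_cons, List.foldl_nil,
        pvStepA, pvStIn, Prod.mk.injEq]
      split_ifs <;> exact ⟨by omega, by omega⟩
    · -- split at mid
      rw [pvSeg]
      simp only [if_neg hbase]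
      set mid := PySem.Int.floordiv (lo + hi) 2 with hmiddef
      have hmid : lo + 1 ≤ mid ∧ mid + 1 ≤ hi := by
        rw [hmiddef, PySem.Int.floordiv_eq_ediv_of_pos (by omega)]; omega
      rw [PySem.List.pyRange_one_append lo mid hi (by omega) (by omega), List.foldl_append]
      rw [ih lo mid s Y (by omega) (by omega) hlo]
      rw [ih mid hi _ _ (by omega) (by omega) (by omega)]
      have hst : pvStIn setup_times J_order mid =
          pvRow setup_times (PySem.List.pyGetD J_order (mid - 1) 0) (PySem.List.pyGetD J_order mid 0) := by
        simp [pvStIn, show mid > 0 by omega]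
      rw [hst]
      simp only [Prod.mk.injEq]
      exact ⟨trivial, by omega⟩

-- ===== VERDICT (by name: the statement is the Claim_ definition above) =====
theorem calculate_delay_spec : Claim_equal_calculate_delay := by
  intro n tasks setup_times J_order _ _
  show calculate_delay n tasks setup_times J_order = calculate_delay_alt n tasks setup_times J_order
  unfold calculate_delay calculate_delay_alt
  by_cases hn : n ≤ 0
  · rw [PySem.List.pyRange_one_eq_nil (by omega)]
    simp [hn]
  · rw [pvFold_eq_seg tasks setup_times J_order n.toNat 0 n 0 0 (by omega) (by omega) le_rfl]
    simp [hn, pvStIn]
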